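-- pv_equiv track=rewrite | github.com/alantero/guitar_scale_finder | fretboard_plot.py | parse_degree_token
-- ===== SOURCE A (Python) =====
-- from typing import List, Set, Tuple, Dict
--
-- def parse_degree_token(token: str) -> Tuple[int, int]:
--     """
--     Parse a degree token into (degree_number, accidental_shift_semitones).
--
--     Supported examples:
--       "1", "2", "7"
--       "b3", "#4", "bb7", "##4", "x4"
--       "3b", "4#", "7bb"
--       "R" (root, same as 1)
--     """
--     t = token.strip()
--     if not t:
--         raise ValueError("Empty degree token")
--
--     # Normalize common unicode accidentals to ascii
--     t = t.replace("♭", "b").replace("♯", "#")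
--
--     if t.lower() in ["r", "root"]:
--         return 1, 0
--
--     # We allow accidentals both prefix and suffix: [acc]*[num]+[acc]*
--     i = 0
--     n = len(t)
--
--     def is_acc(ch: str) -> bool:
--         return ch in ["b", "#", "x"]
--
--     prefix = ""
--     while i < n and is_acc(t[i]):
--         prefix += t[i]
--         i += 1
--
--     if i >= n or not t[i].isdigit():
--         raise ValueError(f"Invalid degree token: {token}")
--
--     j = i
--     while j < n and t[j].isdigit():
--         j += 1
--
--     num_str = t[i:j]
--     suffix = ""
--     k = j
--     while k < n and is_acc(t[k]):
--         suffix += t[k]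
--         k += 1
--
--     if k != n:
--         raise ValueError(f"Invalid degree token: {token}")
--
--     degree = int(num_str)
--     acc = prefix + suffix
--
--     shift = 0
--     for ch in acc:
--         if ch == "b":
--             shift -= 1
--         elif ch == "#":
--             shift += 1
--         elif ch == "x":
--             shift += 2
--
--     return degree, shift
-- ===== SOURCE B (Python) =====
-- def parse_degree_token(token: str):
--     """
--     Parse a degree token into (degree_number, accidental_shift_semitones).
--     """
--     t = token.strip()
--     if not t:
--         raise ValueError("Empty degree token")
--     t = t.replace("♭", "b").replace("♯", "#")
--     if t.lower() in ["r", "root"]: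
--         return 1, 0
--     # valid iff stripping accidentals from both ends leaves a non-empty run of digits
--     core = t.strip("b#x")
--     if not core or not core.isdigit():
--         raise ValueError(f"Invalid degree token: {token}")
--     return int(core), t.count("#") + 2 * t.count("x") - t.count("b")
-- ===== Notes on version B (the rewrite author's own statement) =====
-- stated objective: simpler
-- what changed: A's three index-pointer while-loops and per-character shift accumulator are replaced by one str.strip call that peels the flat/sharp/double-sharp marks off both ends (valid iff a non-empty digit run remains) and by computing the shift from whole-string character counts (count of sharps plus twice count of double-sharps minus count of flats).
import Mathlib
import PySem

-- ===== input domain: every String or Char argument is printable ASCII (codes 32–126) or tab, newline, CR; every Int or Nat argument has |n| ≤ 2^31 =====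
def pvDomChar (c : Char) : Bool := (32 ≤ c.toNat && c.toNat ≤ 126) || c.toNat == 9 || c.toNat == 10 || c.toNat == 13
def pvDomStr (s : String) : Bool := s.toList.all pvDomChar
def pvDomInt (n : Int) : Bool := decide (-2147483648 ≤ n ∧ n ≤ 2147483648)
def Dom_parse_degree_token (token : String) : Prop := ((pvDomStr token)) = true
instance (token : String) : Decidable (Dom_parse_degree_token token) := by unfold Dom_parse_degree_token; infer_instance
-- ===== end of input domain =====

-- B replaces A's three index-scanning while-loops by stripping the b/#/x marks from both
-- ends and computing the shift from whole-string character counts (objective: simpler).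

-- ===== PORT A =====
-- `ch in ["b", "#", "x"]`
def pvIsAcc (ch : Char) : Bool := ['b', '#', 'x'].contains ch

-- the while-loop `while i < n and is_acc(t[i]): prefix += t[i]; i += 1`
-- (returns the collected run of b/#/x marks and the remaining characters)
def pvScanAcc : List Char → List Char × List Char
  | [] => ([], [])
  | c :: cs =>
    if pvIsAcc c then
      let r := pvScanAcc cs
      (c :: r.1, r.2)
    else ([], c :: cs)

-- the while-loop `while j < n and t[j].isdigit(): j += 1` (digit run + remainder)
def pvScanDig : List Char → List Char × List Char
  | [] => ([], [])
  | c :: cs =>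
    if PySem.Chars.isdigit c then
      let r := pvScanDig cs
      (c :: r.1, r.2)
    else ([], c :: cs)

def parse_degree_token (token : String) : Int × Int :=
  let t0 := PySem.Str.strip token
  if t0 = "" then (0, 0)  -- raise ValueError("Empty degree token"): outside Pre_
  else
    -- t = t.replace("♭", "b").replace("♯", "#")
    let t := PySem.Str.replace (PySem.Str.replace t0 "♭" "b") "♯" "#"
    if ["r", "root"].contains (PySem.Str.lower t) then (1, 0)
    else
      let cs := t.toList
      let pr := pvScanAcc cs           -- prefix b/#/x scan
      let dg := pvScanDig pr.2         -- `if i >= n or not t[i].isdigit()` + digit scan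
      if dg.1 = [] then (0, 0)         -- raise ValueError(f"Invalid degree token"): outside Pre_
      else
        let sf := pvScanAcc dg.2       -- suffix b/#/x scan
        if sf.2 ≠ [] then (0, 0)       -- `if k != n: raise ValueError(...)`: outside Pre_
        else
          let degree := (PySem.Int.ofChars? dg.1).getD 0  -- int(num_str); digits, so always some
          let shift := (pr.1 ++ sf.1).foldl
            (fun s ch =>
              if ch = 'b' then s - 1
              else if ch = '#' then s + 1
              else if ch = 'x' then s + 2
              else s) (0 : Int)
          (degree, shift)

-- ===== PORT B =====
def parse_degree_token_alt (token : String) : Int × Int :=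
  let t0 := PySem.Str.strip token
  if t0 = "" then (0, 0)  -- raise ValueError("Empty degree token"): outside Pre_
  else
    let t := PySem.Str.replace (PySem.Str.replace t0 "♭" "b") "♯" "#"
    if ["r", "root"].contains (PySem.Str.lower t) then (1, 0)
    else
      let core := PySem.Str.stripChars t "b#x"           -- t.strip("b#x")
      if core = "" ∨ PySem.Str.strIsdigit core = false then (0, 0)  -- raise ValueError: outside Pre_
      else
        -- t.count(c) for a single-character needle is exactly List.count on the code points
        ((PySem.Int.ofStr? core).getD 0,
         (t.toList.count '#' : Int) + 2 * (t.toList.count 'x' : Int) - (t.toList.count 'b' : Int))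

-- ===== PRECONDITION & SPEC =====
-- Pre_ excludes exactly the inputs on which A raises ValueError: tokens that are empty
-- after whitespace-strip, or that after the ♭/♯→b/# normalization are neither r/root
-- nor a non-empty digit run surrounded by optional b/#/x accidental characters.
def Pre_parse_degree_token (token : String) : Prop :=
  PySem.Str.strip token ≠ "" ∧
    (let t := PySem.Str.replace (PySem.Str.replace (PySem.Str.strip token) "♭" "b") "♯" "#"
     ["r", "root"].contains (PySem.Str.lower t) = true ∨
       PySem.Str.strIsdigit (PySem.Str.stripChars t "b#x") = true)
instance (token : String) : Decidable (Pre_parse_degree_token token) := by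
  unfold Pre_parse_degree_token; infer_instance

def pvWitness_parse_degree_token : String := "bb7#"

def Spec_parse_degree_token (token : String) (out : Int × Int) : Prop := out = parse_degree_token_alt token
instance (token : String) (out : Int × Int) : Decidable (Spec_parse_degree_token token out) := by unfold Spec_parse_degree_token; infer_instance

-- ===== CLAIM (what is proved, stated in full; the proofs are below) =====
def Claim_equal_parse_degree_token : Prop := ∀ (token : String), Dom_parse_degree_token token → Pre_parse_degree_token token → Spec_parse_degree_token token (parse_degree_token token)

-- ===== LEMMAS AND PROOFS =====

theorem pvScanAcc_eq (cs : List Char) :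
    pvScanAcc cs = (cs.takeWhile pvIsAcc, cs.dropWhile pvIsAcc) := by
  induction cs with
  | nil => rfl
  | cons c cs ih =>
    simp only [pvScanAcc, List.takeWhile, List.dropWhile, ih]
    cases h : pvIsAcc c <;> simp_all

theorem pvScanDig_eq (cs : List Char) :
    pvScanDig cs = (cs.takeWhile PySem.Chars.isdigit, cs.dropWhile PySem.Chars.isdigit) := by
  induction cs with
  | nil => rfl
  | cons c cs ih =>
    simp only [pvScanDig, List.takeWhile, List.dropWhile, ih]
    cases h : PySem.Chars.isdigit c <;> simp_all

theorem pvAcc_not_dig {c : Char} (h : pvIsAcc c = true) : PySem.Chars.isdigit c = false := by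
  simp only [pvIsAcc, List.contains_cons, List.contains_nil, Bool.or_eq_true, beq_iff_eq] at h ⊢
  rcases h with h | h | h | h
  · subst h; decide
  · subst h; decide
  · subst h; decide
  · exact absurd h (by decide)

theorem pvTakeWhile_all {p : Char → Bool} {l1 : List Char} (l2 : List Char)
    (h : l1.all p = true) : (l1 ++ l2).takeWhile p = l1 ++ l2.takeWhile p := by
  induction l1 with
  | nil => simp
  | cons c cs ih =>
    simp only [List.all_cons, Bool.and_eq_true] at h
    simp [h.1, ih h.2]

theorem pvDropWhile_all {p : Char → Bool} {l1 : List Char} (l2 : List Char)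
    (h : l1.all p = true) : (l1 ++ l2).dropWhile p = l2.dropWhile p := by
  induction l1 with
  | nil => simp
  | cons c cs ih =>
    simp only [List.all_cons, Bool.and_eq_true] at h
    simp [h.1, ih h.2]

-- the semitone-shift fold equals ±-weighted character counts, on ANY char list
theorem pvFold_counts (l : List Char) (z : Int) :
    l.foldl (fun s ch =>
        if ch = 'b' then s - 1
        else if ch = '#' then s + 1
        else if ch = 'x' then s + 2
        else s) z
      = z + (l.count '#' : Int) + 2 * (l.count 'x' : Int) - (l.count 'b' : Int) := by
  induction l generalizing z with
  | nil => simp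
  | cons c cs ih =>
    simp only [List.foldl_cons, List.count_cons, ih]
    by_cases hb : c = 'b'
    · subst hb; simp; ring
    · by_cases hs : c = '#'
      · subst hs; simp; ring
      · by_cases hx : c = 'x'
        · subst hx; simp; ring
        · simp [hb, hs, hx]

theorem pvCount_zero_of_all_dig {l : List Char} {c : Char}
    (h : l.all PySem.Chars.isdigit = true) (hc : pvIsAcc c = true) : l.count c = 0 := by
  rw [List.count_eq_zero]
  intro hm
  rw [List.all_eq_true] at h
  have := h c hm
  rw [pvAcc_not_dig hc] at this
  exact absurd this (by decide)

-- core equivalence on the character-list level: if stripping the b/#/x marks from both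
-- ends of cs leaves a non-empty all-digit core, then A's three scans accept cs and
-- produce that same core and the same shift as B's counts.
theorem pvMain (cs : List Char)
    (hcore : PySem.Chars.strIsdigit (PySem.Chars.stripChars cs ['b', '#', 'x']) = true) :
    (let pr := pvScanAcc cs
     let dg := pvScanDig pr.2
     if dg.1 = [] then ((0 : Int), (0 : Int))
     else
       let sf := pvScanAcc dg.2
       if sf.2 ≠ [] then (0, 0)
       else
         ((PySem.Int.ofChars? dg.1).getD 0,
          (pr.1 ++ sf.1).foldl
            (fun s ch =>
              if ch = 'b' then s - 1
              else if ch = '#' then s + 1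
              else if ch = 'x' then s + 2
              else s) (0 : Int)))
    = ((PySem.Int.ofChars? (PySem.Chars.stripChars cs ['b', '#', 'x'])).getD 0,
       (cs.count '#' : Int) + 2 * (cs.count 'x' : Int) - (cs.count 'b' : Int)) := by
  -- unpack the definition of stripChars and name the pieces
  simp only [PySem.Chars.strIsdigit, Bool.and_eq_true, Bool.not_eq_true',
    List.isEmpty_eq_false_iff] at hcore
  obtain ⟨hne, hdig⟩ := hcore
  have hcontains : (fun c => List.contains ['b', '#', 'x'] c) = pvIsAcc := by
    funext c; rfl
  set r : List Char := cs.dropWhile pvIsAcc with hr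
  set core : List Char := (r.reverse.dropWhile pvIsAcc).reverse with hcoredef
  have hstrip : PySem.Chars.stripChars cs ['b', '#', 'x'] = core := by
    simp only [PySem.Chars.stripChars, hcontains, hcoredef, hr]
  rw [hstrip] at hne hdig ⊢
  set s : List Char := (r.reverse.takeWhile pvIsAcc).reverse with hsdef
  have hrsplit : r = core ++ s := by
    have : r.reverse = r.reverse.takeWhile pvIsAcc ++ r.reverse.dropWhile pvIsAcc :=
      (List.takeWhile_append_dropWhile).symm
    calc r = r.reverse.reverse := (List.reverse_reverse r).symm
    _ = (r.reverse.takeWhile pvIsAcc ++ r.reverse.dropWhile pvIsAcc).reverse := by rw [← this]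
    _ = core ++ s := by rw [List.reverse_append, hcoredef, hsdef]
  have hsacc : s.all pvIsAcc = true := by
    rw [List.all_eq_true]
    intro c hc
    rw [hsdef, List.mem_reverse] at hc
    exact List.mem_takeWhile_imp hc
  -- A's scans evaluated
  have hsdig_nil : s.takeWhile PySem.Chars.isdigit = [] := by
    cases hs : s with
    | nil => simp
    | cons c cs' =>
      have hacc : pvIsAcc c = true := by
        rw [List.all_eq_true] at hsacc
        exact hsacc c (by rw [hs]; exact List.mem_cons_self ..)
      simp [List.takeWhile, pvAcc_not_dig hacc]
  have hsdrop : s.dropWhile PySem.Chars.isdigit = s := by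
    cases hs : s with
    | nil => simp
    | cons c cs' =>
      have hacc : pvIsAcc c = true := by
        rw [List.all_eq_true] at hsacc
        exact hsacc c (by rw [hs]; exact List.mem_cons_self ..)
      simp [List.dropWhile, pvAcc_not_dig hacc]
  have hdg1 : (pvScanDig r).1 = core := by
    rw [pvScanDig_eq, hrsplit, pvTakeWhile_all _ hdig, hsdig_nil, List.append_nil]
  have hdg2 : (pvScanDig r).2 = s := by
    rw [pvScanDig_eq, hrsplit, pvDropWhile_all _ hdig, hsdrop]
  have hsf1 : (pvScanAcc s).1 = s := by
    rw [pvScanAcc_eq]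
    have := pvTakeWhile_all (p := pvIsAcc) (l1 := s) [] hsacc
    simpa using this
  have hsf2 : (pvScanAcc s).2 = [] := by
    rw [pvScanAcc_eq]
    have := pvDropWhile_all (p := pvIsAcc) (l1 := s) [] hsacc
    simpa using this
  simp only [pvScanAcc_eq cs, hdg1, hdg2, hsf1, hsf2, ← hr]
  rw [if_neg hne]
  simp only [ne_eq, not_true_eq_false, not_false_eq_true, if_neg]
  -- shift: fold over prefix ++ suffix = counts over the whole string
  have hcs : cs = cs.takeWhile pvIsAcc ++ core ++ s := by
    rw [List.append_assoc, ← hrsplit, hr, List.takeWhile_append_dropWhile]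
  rw [Prod.mk.injEq]
  refine ⟨rfl, ?_⟩
  · rw [pvFold_counts]
    conv_rhs => rw [hcs]
    simp only [List.count_append,
      pvCount_zero_of_all_dig hdig (by decide : pvIsAcc '#' = true),
      pvCount_zero_of_all_dig hdig (by decide : pvIsAcc 'x' = true),
      pvCount_zero_of_all_dig hdig (by decide : pvIsAcc 'b' = true)]
    push_cast
    ring

-- ===== VERDICT (by name: the statement is the Claim_ definition above) =====
theorem parse_degree_token_spec : Claim_equal_parse_degree_token := by
  intro token _hdom hpre
  obtain ⟨hne, hcase⟩ := hpre
  unfold Spec_parse_degree_token parse_degree_token parse_degree_token_alt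
  simp only
  rw [if_neg hne, if_neg hne]
  simp only at hcase
  set t : String := PySem.Str.replace (PySem.Str.replace (PySem.Str.strip token) "♭" "b") "♯" "#" with ht
  rcases hcase with hroot | hpat
  · rw [if_pos hroot, if_pos hroot]
  · by_cases hroot : ["r", "root"].contains (PySem.Str.lower t) = true
    · rw [if_pos hroot, if_pos hroot]
    · rw [if_neg hroot, if_neg hroot]
      -- move B's String-level operations to the character-list level
      have hb : ("b#x" : String).toList = ['b', '#', 'x'] := rfl
      have hstripB : (PySem.Str.stripChars t "b#x").toList
          = PySem.Chars.stripChars t.toList ['b', '#', 'x'] := by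
        rw [PySem.Str.toList_stripChars, hb]
      have hpat' : PySem.Chars.strIsdigit
          (PySem.Chars.stripChars t.toList ['b', '#', 'x']) = true := by
        rw [← hstripB]
        exact hpat
      have hmain := pvMain t.toList hpat'
      simp only at hmain
      rw [hmain]
      -- B's branch test is false: the core is non-empty and all digits
      have hcne : PySem.Str.stripChars t "b#x" ≠ "" := by
        intro h
        rw [h] at hpat
        exact absurd hpat (by decide)
      rw [if_neg (by push Not; exact ⟨hcne, by rw [hpat]; decide⟩)]
      -- int(core): ofStr? on the string is ofChars? on its characters
      have hofs : PySem.Int.ofStr? (PySem.Str.stripChars t "b#x")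
          = PySem.Int.ofChars? (PySem.Chars.stripChars t.toList ['b', '#', 'x']) := by
        rw [PySem.Int.ofStr?, hstripB]
      rw [hofs]
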